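-- pv_equiv track=rewrite | github.com/selenologist/hanzi-srs | cedict2pinyin.py | add_accents
-- ===== SOURCE A (Python) =====
-- vowels = ['a', 'o', 'e', 'i', 'u', 'ü']
--
-- tones = {
--     'a':['ā','á','ǎ','à'],
--     'o':['ō','ó','ǒ','ò'],
--     'e':['ē','é','ě','è'],
--     'i':['ī','í','ǐ','ì'],
--     'u':['ū','ú','ǔ','ù'],
--     'ü':['ǖ','ǘ','ǚ','ǜ']
-- }
--
-- def add_accents(syl):
--     # force syllable lowercase
--     syl = syl.lower()
--
--     tone = syl[-1]
--     if tone.isdigit():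
--         tone = int(tone)
--     else:
--         # default to neutral
--         tone = 5
--
--     # now we can strip the tone number off the string...
--     # ...actually, it's more readable if it's left in with a space so 1 doesn:t look like i
--     syl = syl[:-1] + " " + str(tone)
--
--     # for neutral tone, we don't need to do anything else
--
--     if tone != 5:
--         # for non-neutral tone, find the vowel that should be replaced... and replace it
--
--         # the tones array is zero-indexed, while tone is currently 1-indexed.
--         # correct for this
--         tone -= 1
--
--         # iu is the exception to the ordering rule, so handle it first
--         pos = syl.find("iu")
--         if pos >= 0:
--             # put the tone on the u (so add 1 to the index)
--             before = syl[:pos+1]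
--             after  = syl[pos+2:]
--             syl = before + tones['u'][tone] + after
--         else:
--             # try to replace vowels in priority-order, exiting after the first match
--             for vowel in vowels:
--                 pos = syl.find(vowel)
--                 if pos >= 0:
--                     before = syl[:pos]
--                     after  = syl[pos+1:]
--                     syl = before + tones[vowel][tone] + after
--                     break
--     return syl
-- ===== SOURCE B (Python) =====
-- TONE_MARKS = {'a': 'āáǎà', 'o': 'ōóǒò', 'e': 'ēéěè',
--               'i': 'īíǐì', 'u': 'ūúǔù', 'ü': 'ǖǘǚǜ'}
-- RANK = {'a': 0, 'o': 1, 'e': 2, 'i': 3, 'u': 4, 'ü': 5}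
--
-- def add_accents(syl):
--     syl = syl.lower()
--     last = syl[-1]
--     tone = int(last) if last.isdigit() else 5
--     syl = syl[:-1] + " " + str(tone)
--     if tone == 5:
--         return syl
--     # pick the accent position as the lexicographic argmin of (priority rank, index)
--     # over all vowel occurrences; a 'u' right after an 'i' wins outright (break)
--     best = None
--     prev = ''
--     for i, ch in enumerate(syl):
--         if ch == 'u' and prev == 'i':
--             best = (-1, i, 'u')
--             break
--         if ch in RANK:
--             cand = (RANK[ch], i, ch)
--             if best is None or cand < best:
--                 best = cand
--         prev = ch
--     if best is None:
--         return syl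
--     _, i, v = best
--     return syl[:i] + TONE_MARKS[v][tone - 1] + syl[i + 1:]
-- ===== Notes on version B (the rewrite author's own statement) =====
-- stated objective: alternative
-- what changed: A selects the accent position by staged str.find scans (one scan for 'iu' then one scan per vowel in priority order, exiting on the first hit); B instead makes a single pass computing the lexicographic argmin of (priority-rank, index) over all vowel occurrences, with an i-followed-by-u pair breaking out as an outright winner, and splices at that argmin.
import Mathlib
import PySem

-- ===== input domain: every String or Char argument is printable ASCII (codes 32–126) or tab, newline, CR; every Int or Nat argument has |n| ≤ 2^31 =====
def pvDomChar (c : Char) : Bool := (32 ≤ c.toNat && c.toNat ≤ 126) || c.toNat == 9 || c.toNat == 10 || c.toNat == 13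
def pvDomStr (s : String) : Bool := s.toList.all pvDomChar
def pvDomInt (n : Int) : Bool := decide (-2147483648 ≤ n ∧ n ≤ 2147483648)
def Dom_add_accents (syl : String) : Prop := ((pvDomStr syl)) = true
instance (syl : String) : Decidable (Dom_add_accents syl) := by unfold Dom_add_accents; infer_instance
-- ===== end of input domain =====

-- B replaces A's staged priority-order str.find scans by ONE pass that computes the
-- lexicographic argmin of (priority rank, index) over vowel occurrences (an i-then-u
-- pair breaks out as outright winner); objective: alternative algorithm, same cost class.
-- ===== PORT A =====
def pvVowelsA : List Char := ['a', 'o', 'e', 'i', 'u', 'ü']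

def pvTonesA (v : Char) : List Char :=
  match v with
  | 'a' => ['ā','á','ǎ','à']
  | 'o' => ['ō','ó','ǒ','ò']
  | 'e' => ['ē','é','ě','è']
  | 'i' => ['ī','í','ǐ','ì']
  | 'u' => ['ū','ú','ǔ','ù']
  | 'ü' => ['ǖ','ǘ','ǚ','ǜ']
  | _ => []           -- Python: KeyError; never queried with another char

-- the 'for vowel in vowels: … break' loop of A
def pvLoopA (s : List Char) (tone : Int) : List Char → List Char
  | [] => s
  | v :: rest =>
    let pos := PySem.Chars.find s [v]
    if pos ≥ 0 then
      PySem.List.slice s none (some pos)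
        ++ (PySem.List.pyGet? (pvTonesA v) tone).toList
        ++ PySem.List.slice s (some (pos + 1)) none
    else pvLoopA s tone rest

def add_accents (syl : String) : String :=
  let s := (PySem.Str.lower syl).toList
  match PySem.List.pyGet? s (-1) with
  | none => ""        -- Python: IndexError on the empty string; excluded by Pre_
  | some tc =>
    -- int of a single digit char; exact since isdigit holds only for '0'-'9' on the ASCII domain
    let tone : Int := if PySem.Chars.isdigit tc then (tc.toNat : Int) - 48 else 5
    let s := PySem.List.slice s none (some (-1)) ++ [' '] ++ PySem.Int.toChars tone
    if tone ≠ 5 then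
      let tone := tone - 1
      let pos := PySem.Chars.find s ['i', 'u']
      if pos ≥ 0 then
        String.ofList (PySem.List.slice s none (some (pos + 1))
          ++ (PySem.List.pyGet? (pvTonesA 'u') tone).toList   -- pyGet? none = Python IndexError (tone digit 6-9); excluded by Pre_
          ++ PySem.List.slice s (some (pos + 2)) none)
      else
        String.ofList (pvLoopA s tone pvVowelsA)
    else String.ofList s

-- ===== PORT B =====
def pvMarksB (v : Char) : List Char :=
  match v with
  | 'a' => ['ā','á','ǎ','à']
  | 'o' => ['ō','ó','ǒ','ò']
  | 'e' => ['ē','é','ě','è']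
  | 'i' => ['ī','í','ǐ','ì']
  | 'u' => ['ū','ú','ǔ','ù']
  | 'ü' => ['ǖ','ǘ','ǚ','ǜ']
  | _ => []

-- RANK[ch] (none = ch not in RANK)
def pvRankB (c : Char) : Option Int :=
  match c with
  | 'a' => some 0
  | 'o' => some 1
  | 'e' => some 2
  | 'i' => some 3
  | 'u' => some 4
  | 'ü' => some 5
  | _ => none

-- Python tuple '<' on (rank, index, char); chars compare by code point
def pvLtB (a b : Int × Int × Char) : Bool :=
  a.1 < b.1 || (a.1 == b.1 && (a.2.1 < b.2.1 || (a.2.1 == b.2.1 && a.2.2.toNat < b.2.2.toNat)))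

-- the 'if ch in RANK: … cand < best' update of Source B's loop body
def pvStepB (best : Option (Int × Int × Char)) (i : Int) (c : Char) : Option (Int × Int × Char) :=
  match pvRankB c with
  | none => best
  | some r =>
    match best with
    | none => some (r, i, c)
    | some b => if pvLtB (r, i, c) b then some (r, i, c) else some b

-- Source B's 'for i, ch in enumerate(syl)' loop with its break; prev = '' ported as '\x00'
def pvScanB : List Char → Int → Char → Option (Int × Int × Char) → Option (Int × Int × Char)
  | [], _, _, best => best
  | c :: rest, i, prev, best =>
    if c = 'u' ∧ prev = 'i' then some (-1, i, 'u')
    else pvScanB rest (i + 1) c (pvStepB best i c)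

def add_accents_alt (syl : String) : String :=
  let s := (PySem.Str.lower syl).toList
  match PySem.List.pyGet? s (-1) with
  | none => ""        -- Python: IndexError on the empty string; excluded by Pre_
  | some last =>
    let tone : Int := if PySem.Chars.isdigit last then (last.toNat : Int) - 48 else 5
    let s := PySem.List.slice s none (some (-1)) ++ [' '] ++ PySem.Int.toChars tone
    if tone = 5 then String.ofList s
    else
      match pvScanB s 0 '\x00' none with
      | none => String.ofList s
      | some (_, i, v) =>
        String.ofList (PySem.List.slice s none (some i)
          ++ (PySem.List.pyGet? (pvMarksB v) (tone - 1)).toList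
          ++ PySem.List.slice s (some (i + 1)) none)

-- ===== PRECONDITION & SPEC =====
-- Pre_ excludes exactly the inputs on which the Python A raises: the empty string (IndexError on
-- syl[-1]) and strings whose last character is a digit 6-9 while a vowel occurs before it
-- (IndexError indexing the 4-element tone list).
def Pre_add_accents (syl : String) : Prop :=
  syl.toList ≠ [] ∧
  ¬ ((PySem.Chars.lower syl.toList).getLast? ∈ [some '6', some '7', some '8', some '9'] ∧
     ∃ v ∈ (['a','o','e','i','u','ü'] : List Char), v ∈ (PySem.Chars.lower syl.toList).dropLast)
instance (syl : String) : Decidable (Pre_add_accents syl) := by unfold Pre_add_accents; infer_instance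

def pvWitness_add_accents : String := "niu2"

def Spec_add_accents (syl : String) (out : String) : Prop := out = add_accents_alt syl
instance (syl : String) (out : String) : Decidable (Spec_add_accents syl out) := by unfold Spec_add_accents; infer_instance

-- ===== CLAIM (what is proved, stated in full; the proofs are below) =====
def Claim_equal_add_accents : Prop := ∀ (syl : String), Dom_add_accents syl → Pre_add_accents syl → Spec_add_accents syl (add_accents syl)

-- ===== LEMMAS AND PROOFS =====

-- proof-only helpers: pure recursive specifications
def pvPairFind : List Char → Option Nat
  | a :: b :: r => if a = 'i' ∧ b = 'u' then some 0 else (pvPairFind (b :: r)).map (· + 1)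
  | _ => none

-- the vowel occurrences of s, decorated (rank, index, char), indices from i
def pvEntries : List Char → Int → List (Int × Int × Char)
  | [], _ => []
  | c :: r, i =>
    match pvRankB c with
    | some rk => (rk, i, c) :: pvEntries r (i + 1)
    | none => pvEntries r (i + 1)

-- ---- small prefix facts ----
theorem pvSingleton_prefix_iff (l : List Char) (v : Char) : [v] <+: l ↔ l.head? = some v := by
  cases l with
  | nil => simp
  | cons a t => simp [List.cons_prefix_cons, eq_comm]

theorem pvPair_prefix_iff (l : List Char) : ['i','u'] <+: l ↔ l[0]? = some 'i' ∧ l[1]? = some 'u' := by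
  match l with
  | [] => simp
  | [a] => simp [List.cons_prefix_cons, eq_comm]
  | a :: b :: t => simp [List.cons_prefix_cons, eq_comm]

-- find points at the unique first occurrence
theorem pvFind_eq_of (cs pat : List Char) (k : Nat) (h1 : pat <+: cs.drop k)
    (h2 : ∀ j < k, ¬ pat <+: cs.drop j) : PySem.Chars.find cs pat = (k : Int) := by
  have hin : pat <:+: cs :=
    (PySem.Chars.isIn_iff_infix pat cs).mp ((PySem.Chars.exists_prefix_drop_iff_isIn pat cs).mp ⟨k, h1⟩)
  have hnn : 0 ≤ PySem.Chars.find cs pat := (PySem.Chars.find_nonneg_iff cs pat).mpr hin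
  obtain ⟨hp, hmin⟩ := PySem.Chars.find_spec hnn
  have hk1 : ¬ (PySem.Chars.find cs pat).toNat < k := fun h => h2 _ h hp
  have hk2 : ¬ k < (PySem.Chars.find cs pat).toNat := fun h => hmin k h h1
  omega

-- ---- single-character find = index? ----
theorem pvFind_single (s : List Char) (v : Char) :
    PySem.Chars.find s [v] = (PySem.List.index? s v).elim (-1) (fun k => (k : Int)) := by
  cases h : PySem.List.index? s v with
  | none =>
    have hv : v ∉ s := (PySem.List.index?_eq_none_iff s v).mp h
    simp only [Option.elim]
    rw [PySem.Chars.find_eq_neg_one_iff]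
    intro hin
    exact hv (hin.subset (by simp))
  | some k =>
    obtain ⟨hk, hkv, hmin⟩ := PySem.List.getElem_of_index?_eq_some h
    simp only [Option.elim]
    apply pvFind_eq_of
    · rw [pvSingleton_prefix_iff, List.head?_drop]
      simp [List.getElem?_eq_getElem hk, hkv]
    · intro j hj hpre
      rw [pvSingleton_prefix_iff, List.head?_drop] at hpre
      have hjl : j < s.length := lt_trans hj hk
      rw [List.getElem?_eq_getElem hjl] at hpre
      exact hmin j hj (by simpa using hpre)

-- ---- the first "iu" pair ----
theorem pvPairFind_some (l : List Char) : ∀ k, pvPairFind l = some k →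
    ['i','u'] <+: l.drop k ∧ ∀ j < k, ¬ ['i','u'] <+: l.drop j := by
  induction l with
  | nil => intro k h; simp [pvPairFind] at h
  | cons a rest ih =>
    intro k h
    cases rest with
    | nil => simp [pvPairFind] at h
    | cons b r =>
      by_cases hab : a = 'i' ∧ b = 'u'
      · have hk : k = 0 := by simp [pvPairFind, hab] at h; omega
        subst hk
        refine ⟨?_, by omega⟩
        obtain ⟨ha, hb⟩ := hab; subst ha; subst hb
        exact ⟨r, rfl⟩
      · rw [show pvPairFind (a :: b :: r) = (pvPairFind (b :: r)).map (· + 1) by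
          simp only [pvPairFind]; rw [if_neg hab]] at h
        rcases hm : pvPairFind (b :: r) with _ | m
        · rw [hm] at h; simp at h
        · rw [hm] at h; simp at h
          obtain ⟨h1, h2⟩ := ih m hm
          refine ⟨by rw [← h]; exact h1, ?_⟩
          intro j hj hpre
          cases j with
          | zero =>
            rw [List.drop_zero, pvPair_prefix_iff] at hpre
            exact hab ⟨by simpa using hpre.1, by simpa using hpre.2⟩
          | succ j' => exact h2 j' (by omega) hpre

theorem pvPairFind_none (l : List Char) : pvPairFind l = none → ∀ j, ¬ ['i','u'] <+: l.drop j := by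
  induction l with
  | nil => intro _ j hp; rw [List.drop_nil] at hp; simp at hp
  | cons a rest ih =>
    intro h j hp
    cases rest with
    | nil =>
      cases j with
      | zero => rw [List.drop_zero, pvPair_prefix_iff] at hp; simp at hp
      | succ j' => simp at hp
    | cons b r =>
      have hab : ¬ (a = 'i' ∧ b = 'u') := by
        intro hc; simp [pvPairFind, hc] at h
      have htail : pvPairFind (b :: r) = none := by
        rw [show pvPairFind (a :: b :: r) = (pvPairFind (b :: r)).map (· + 1) by
          simp only [pvPairFind]; rw [if_neg hab]] at h
        simpa using h
      cases j with
      | zero =>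
        rw [List.drop_zero, pvPair_prefix_iff] at hp
        exact hab ⟨by simpa using hp.1, by simpa using hp.2⟩
      | succ j' => exact ih htail j' hp

theorem pvFind_pair (s : List Char) :
    PySem.Chars.find s ['i','u'] = (pvPairFind s).elim (-1) (fun k => (k : Int)) := by
  cases h : pvPairFind s with
  | none =>
    simp only [Option.elim]
    rw [PySem.Chars.find_eq_neg_one_iff]
    intro hin
    obtain ⟨j, hj⟩ := (PySem.Chars.exists_prefix_drop_iff_isIn ['i','u'] s).mpr
      ((PySem.Chars.isIn_iff_infix ['i','u'] s).mpr hin)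
    exact pvPairFind_none s h j hj
  | some k =>
    simp only [Option.elim]
    obtain ⟨h1, h2⟩ := pvPairFind_some s k h
    exact pvFind_eq_of s _ k h1 h2

theorem pvPairFind_cons_ne (x : Char) (hx : x ≠ 'i') (l : List Char) :
    pvPairFind (x :: l) = (pvPairFind l).map (· + 1) := by
  cases l with
  | nil => simp [pvPairFind]
  | cons b r => simp only [pvPairFind]; rw [if_neg (fun h : x = 'i' ∧ b = 'u' => hx h.1)]

-- ---- rank and order facts ----
theorem pvRankB_inv (c : Char) (r : Int) (h : pvRankB c = some r) :
    (c = 'a' ∧ r = 0) ∨ (c = 'o' ∧ r = 1) ∨ (c = 'e' ∧ r = 2) ∨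
    (c = 'i' ∧ r = 3) ∨ (c = 'u' ∧ r = 4) ∨ (c = 'ü' ∧ r = 5) := by
  unfold pvRankB at h
  split at h <;> simp_all

theorem pvRankB_inj (c d : Char) (r : Int) (hc : pvRankB c = some r) (hd : pvRankB d = some r) :
    c = d := by
  rcases pvRankB_inv c r hc with ⟨h1, h2⟩ | ⟨h1, h2⟩ | ⟨h1, h2⟩ | ⟨h1, h2⟩ | ⟨h1, h2⟩ | ⟨h1, h2⟩ <;>
    rcases pvRankB_inv d r hd with ⟨h3, h4⟩ | ⟨h3, h4⟩ | ⟨h3, h4⟩ | ⟨h3, h4⟩ | ⟨h3, h4⟩ | ⟨h3, h4⟩ <;>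
    simp_all

theorem pvLtB_asym (a b : Int × Int × Char) (h : pvLtB a b = true) : pvLtB b a = false := by
  simp only [pvLtB, Bool.or_eq_true, Bool.and_eq_true, decide_eq_true_eq, beq_iff_eq] at h
  simp only [pvLtB, Bool.or_eq_false_iff, Bool.and_eq_false_iff, decide_eq_false_iff_not,
    beq_eq_false_iff_ne, ne_eq, not_lt]
  omega

-- ---- scan characterizations ----
-- break case: first "iu" of (prev :: s) at m ⇒ scan stops at the u with index i + m
theorem pvScan_iu (s : List Char) : ∀ (i : Int) (prev : Char) (best : Option (Int × Int × Char)) (m : Nat),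
    pvPairFind (prev :: s) = some m → pvScanB s i prev best = some (-1, i + m, 'u') := by
  induction s with
  | nil => intro i prev best m h; simp [pvPairFind] at h
  | cons c r ih =>
    intro i prev best m h
    by_cases hpc : c = 'u' ∧ prev = 'i'
    · have h0 : pvPairFind (prev :: c :: r) = some 0 := by
        simp only [pvPairFind]; rw [if_pos ⟨hpc.2, hpc.1⟩]
      rw [h0] at h
      have hm : m = 0 := by simpa using h.symm
      subst hm
      simp only [pvScanB]
      rw [if_pos hpc]
      norm_num
    · have hne : ¬ (prev = 'i' ∧ c = 'u') := fun hc => hpc ⟨hc.2, hc.1⟩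
      rw [show pvPairFind (prev :: c :: r) = (pvPairFind (c :: r)).map (· + 1) by
        simp only [pvPairFind]; rw [if_neg hne]] at h
      rcases hm : pvPairFind (c :: r) with _ | m'
      · rw [hm] at h; simp at h
      · rw [hm] at h
        simp only [Option.map_some, Option.some.injEq] at h
        simp only [pvScanB]
        rw [if_neg hpc, ih (i + 1) c _ m' hm]
        have hm1 : m = m' + 1 := by omega
        subst hm1
        rw [show i + 1 + (m' : Int) = i + ((m' + 1 : Nat) : Int) by push_cast; ring]

-- no-break case: the scan is a min-fold over the decorated entries
theorem pvScan_noiu (s : List Char) : ∀ (i : Int) (prev : Char) (best : Option (Int × Int × Char)),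
    pvPairFind (prev :: s) = none →
    pvScanB s i prev best = (pvEntries s i).foldl (fun b e => pvStepB b e.2.1 e.2.2) best := by
  induction s with
  | nil => intro i prev best _; simp [pvScanB, pvEntries]
  | cons c r ih =>
    intro i prev best h
    have hne : ¬ (prev = 'i' ∧ c = 'u') := by
      intro hc
      have h0 : pvPairFind (prev :: c :: r) = some 0 := by
        simp only [pvPairFind]; rw [if_pos hc]
      rw [h0] at h; cases h
    have htail : pvPairFind (c :: r) = none := by
      rw [show pvPairFind (prev :: c :: r) = (pvPairFind (c :: r)).map (· + 1) by
        simp only [pvPairFind]; rw [if_neg hne]] at h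
      simpa using h
    simp only [pvScanB]
    rw [if_neg (fun hc : c = 'u' ∧ prev = 'i' => hne ⟨hc.2, hc.1⟩), ih (i + 1) c _ htail]
    simp only [pvEntries]
    cases hrk : pvRankB c with
    | none => rw [show pvStepB best i c = best by simp [pvStepB, hrk]]
    | some rk => simp only [List.foldl_cons]

-- membership in the decorated entry list
theorem pvEntries_mem (s : List Char) : ∀ (i : Int) (x : Int × Int × Char),
    x ∈ pvEntries s i ↔ ∃ j : Nat, j < s.length ∧ x.2.1 = i + j ∧ s[j]? = some x.2.2 ∧ pvRankB x.2.2 = some x.1 := by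
  induction s with
  | nil => intro i x; simp [pvEntries]
  | cons c r ih =>
    intro i x
    constructor
    · intro hx
      simp only [pvEntries] at hx
      cases hrk : pvRankB c with
      | none =>
        rw [hrk] at hx
        obtain ⟨j, hj, hji, hjc, hjr⟩ := (ih (i + 1) x).mp hx
        exact ⟨j + 1, by simpa using hj, by omega, by simpa using hjc, hjr⟩
      | some rk =>
        rw [hrk] at hx
        rcases List.mem_cons.mp hx with he | hx'
        · refine ⟨0, by simp, ?_, ?_, ?_⟩ <;> rw [he] <;> simp [hrk]
        · obtain ⟨j, hj, hji, hjc, hjr⟩ := (ih (i + 1) x).mp hx'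
          exact ⟨j + 1, by simpa using hj, by omega, by simpa using hjc, hjr⟩
    · rintro ⟨j, hj, hji, hjc, hjr⟩
      simp only [pvEntries]
      cases j with
      | zero =>
        have hc : c = x.2.2 := by simpa using hjc
        have h0 : x.2.1 = i := by omega
        have hx1 : x = (x.1, i, x.2.2) := Prod.ext rfl (Prod.ext h0 rfl)
        subst hc
        rw [hjr]
        exact List.mem_cons.mpr (Or.inl hx1)
      | succ j' =>
        have hmem : x ∈ pvEntries r (i + 1) :=
          (ih (i + 1) x).mpr ⟨j', by simpa using hj, by omega, by simpa using hjc, hjr⟩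
        cases hrk : pvRankB c with
        | none => exact hmem
        | some rk => exact List.mem_cons_of_mem _ hmem

theorem pvEntries_nil_of_no_vowel (s : List Char)
    (h : ∀ v ∈ pvVowelsA, v ∉ s) : ∀ i, pvEntries s i = [] := by
  induction s with
  | nil => intro i; simp [pvEntries]
  | cons c r ih =>
    intro i
    have hc : pvRankB c = none := by
      cases hrk : pvRankB c with
      | none => rfl
      | some rk =>
        exfalso
        have hcv : c ∈ pvVowelsA := by
          rcases pvRankB_inv c rk hrk with ⟨hc, _⟩ | ⟨hc, _⟩ | ⟨hc, _⟩ | ⟨hc, _⟩ | ⟨hc, _⟩ | ⟨hc, _⟩ <;>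
            rw [hc] <;> decide
        exact h c hcv List.mem_cons_self
    simp only [pvEntries, hc]
    exact ih (fun v hv hvr => h v hv (List.mem_cons_of_mem _ hvr)) (i + 1)

-- the min-fold returns the strict minimum when one exists
theorem pvFoldMin_eq (l : List (Int × Int × Char)) : ∀ (best : Option (Int × Int × Char)) (m : Int × Int × Char),
    (∀ x ∈ l, pvRankB x.2.2 = some x.1) →
    (m ∈ l ∨ best = some m) →
    (∀ x ∈ l, x = m ∨ (pvLtB m x = true ∧ pvLtB x m = false)) →
    (∀ b, best = some b → b = m ∨ (pvLtB m b = true ∧ pvLtB b m = false)) →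
    l.foldl (fun b e => pvStepB b e.2.1 e.2.2) best = some m := by
  induction l with
  | nil =>
    intro best m _ h1 _ _
    rcases h1 with h | h
    · cases h
    · exact h
  | cons c r ih =>
    intro best m hrkl h1 h2 h3
    have hrk : pvRankB c.2.2 = some c.1 := hrkl c List.mem_cons_self
    simp only [List.foldl_cons]
    cases best with
    | none =>
      rw [show pvStepB none c.2.1 c.2.2 = some c by simp [pvStepB, hrk]]
      apply ih (some c) m (fun x hx => hrkl x (List.mem_cons_of_mem _ hx)) ?_
        (fun x hx => h2 x (List.mem_cons_of_mem _ hx)) ?_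
      · by_cases hmc : m = c
        · exact Or.inr (by rw [hmc])
        · rcases h1 with h | h
          · rcases List.mem_cons.mp h with he | hr
            · exact absurd he hmc
            · exact Or.inl hr
          · cases h
      · intro b hb
        have hbc : b = c := by simpa using hb.symm
        subst hbc
        exact h2 b List.mem_cons_self
    | some b0 =>
      have hb0m := h3 b0 rfl
      by_cases hlt : pvLtB c b0 = true
      · rw [show pvStepB (some b0) c.2.1 c.2.2 = some c by simp [pvStepB, hrk, hlt]]
        apply ih (some c) m (fun x hx => hrkl x (List.mem_cons_of_mem _ hx)) ?_
          (fun x hx => h2 x (List.mem_cons_of_mem _ hx)) ?_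
        · by_cases hmc : m = c
          · exact Or.inr (by rw [hmc])
          · rcases h1 with h | h
            · rcases List.mem_cons.mp h with he | hr
              · exact absurd he hmc
              · exact Or.inl hr
            · have hb : b0 = m := by simpa using h
              subst hb
              rcases h2 c List.mem_cons_self with hc | ⟨_, hcm⟩
              · exact absurd hc.symm hmc
              · rw [hcm] at hlt; cases hlt
        · intro b hb
          have hbc : b = c := by simpa using hb.symm
          subst hbc
          exact h2 b List.mem_cons_self
      · rw [show pvStepB (some b0) c.2.1 c.2.2 = some b0 by simp [pvStepB, hrk, hlt]]
        apply ih (some b0) m (fun x hx => hrkl x (List.mem_cons_of_mem _ hx)) ?_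
          (fun x hx => h2 x (List.mem_cons_of_mem _ hx)) ?_
        · by_cases hmc : m = c
          · rcases hb0m with hb | ⟨hmb, _⟩
            · exact Or.inr (by rw [hb])
            · rw [hmc] at hmb
              exact absurd hmb hlt
          · rcases h1 with h | h
            · rcases List.mem_cons.mp h with he | hr
              · exact absurd he hmc
              · exact Or.inl hr
            · exact Or.inr h
        · intro b hb
          have hbc : b = b0 := by simpa using hb.symm
          subst hbc
          exact h3 b rfl

-- assembled B-side fact: the scan (no iu present) returns the decorated argmin (rv, k, v)
theorem pvFoldMin_entries (s : List Char) (v : Char) (rv : Int) (k : Nat)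
    (hrv : pvRankB v = some rv)
    (hvk : PySem.List.index? s v = some k)
    (hmin : ∀ c r, pvRankB c = some r → c ∈ s → rv ≤ r) :
    (pvEntries s 0).foldl (fun b e => pvStepB b e.2.1 e.2.2) none = some (rv, (k : Int), v) := by
  obtain ⟨hk, hkv, hfirst⟩ := PySem.List.getElem_of_index?_eq_some hvk
  apply pvFoldMin_eq
  · intro x hx
    obtain ⟨j, hj, hji, hjc, hjr⟩ := (pvEntries_mem s 0 x).mp hx
    exact hjr
  · left
    exact (pvEntries_mem s 0 (rv, (k : Int), v)).mpr
      ⟨k, hk, by simp, by simp [List.getElem?_eq_getElem hk, hkv], hrv⟩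
  · intro x hx
    obtain ⟨j, hj, hji, hjc, hjr⟩ := (pvEntries_mem s 0 x).mp hx
    have hxs : x.2.2 ∈ s := by
      have := List.getElem?_eq_some_iff.mp hjc
      obtain ⟨hlt, hget⟩ := this
      exact hget ▸ List.getElem_mem hlt
    have hle : rv ≤ x.1 := hmin x.2.2 x.1 hjr hxs
    by_cases heq : x.1 = rv
    · -- same rank ⇒ same char v; compare indices
      have hcv : x.2.2 = v := pvRankB_inj x.2.2 v rv (heq ▸ hjr) hrv
      have hjv : s[j]? = some v := hcv ▸ hjc
      have hkj : k ≤ j := by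
        by_contra hc
        exact hfirst j (by omega) (by
          have := List.getElem?_eq_some_iff.mp hjv
          obtain ⟨hlt, hget⟩ := this
          exact hget)
      by_cases hkje : k = j
      · left
        have : x = (x.1, x.2.1, x.2.2) := rfl
        rw [this, heq, hcv, hji]
        subst hkje
        norm_num
      · have hlt1 : pvLtB (rv, (k : Int), v) x = true := by
          simp only [pvLtB, Bool.or_eq_true, Bool.and_eq_true, decide_eq_true_eq, beq_iff_eq]
          omega
        exact Or.inr ⟨hlt1, pvLtB_asym _ _ hlt1⟩
    · have hlt1 : pvLtB (rv, (k : Int), v) x = true := by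
        simp only [pvLtB, Bool.or_eq_true, Bool.and_eq_true, decide_eq_true_eq, beq_iff_eq]
        omega
      exact Or.inr ⟨hlt1, pvLtB_asym _ _ hlt1⟩
  · intro b hb
    cases hb

-- ---- A-side loop ----
theorem pvLoopA_skip (s : List Char) (t : Int) (v : Char) (rest : List Char) (hv : v ∉ s) :
    pvLoopA s t (v :: rest) = pvLoopA s t rest := by
  simp only [pvLoopA]
  rw [pvFind_single, (PySem.List.index?_eq_none_iff s v).mpr hv]
  norm_num

theorem pvLoopA_hit (s : List Char) (t : Int) (v : Char) (rest : List Char) (k : Nat)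
    (h : PySem.List.index? s v = some k) :
    pvLoopA s t (v :: rest) = PySem.List.slice s none (some (k : Int))
      ++ (PySem.List.pyGet? (pvTonesA v) t).toList
      ++ PySem.List.slice s (some ((k : Int) + 1)) none := by
  simp only [pvLoopA]
  rw [pvFind_single, h]
  simp only [Option.elim]
  rw [if_pos (by positivity)]

-- index? is some exactly on membership
theorem pvIndex?_of_mem (s : List Char) (v : Char) (hv : v ∈ s) :
    ∃ k, PySem.List.index? s v = some k := by
  cases h : PySem.List.index? s v with
  | none => exact absurd ((PySem.List.index?_eq_none_iff s v).mp h) (not_not_intro hv)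
  | some k => exact ⟨k, rfl⟩

-- the heart: with no "iu" pair, A's priority loop = B's scan splice
theorem pvMain (s : List Char) (t : Int) (hno : pvPairFind s = none) :
    String.ofList (pvLoopA s t pvVowelsA) =
      (match pvScanB s 0 '\x00' none with
       | none => String.ofList s
       | some (_, i, v) =>
         String.ofList (PySem.List.slice s none (some i)
           ++ (PySem.List.pyGet? (pvMarksB v) t).toList
           ++ PySem.List.slice s (some (i + 1)) none)) := by
  have hcons : pvPairFind ('\x00' :: s) = none := by
    rw [pvPairFind_cons_ne '\x00' (by decide) s, hno]; rfl
  have hscan := pvScan_noiu s 0 '\x00' none hcons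
  rw [show pvVowelsA = ['a','o','e','i','u','ü'] from rfl]
  by_cases ha : 'a' ∈ s
  · obtain ⟨k, hk⟩ := pvIndex?_of_mem s 'a' ha
    have hfold := pvFoldMin_entries s 'a' 0 k rfl hk
      (fun c r hr _ => by
        rcases pvRankB_inv c r hr with ⟨_, h2⟩ | ⟨_, h2⟩ | ⟨_, h2⟩ | ⟨_, h2⟩ | ⟨_, h2⟩ | ⟨_, h2⟩ <;> omega)
    rw [hscan, hfold, pvLoopA_hit s t 'a' _ k hk]; rfl
  · by_cases ho : 'o' ∈ s
    · obtain ⟨k, hk⟩ := pvIndex?_of_mem s 'o' ho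
      have hfold := pvFoldMin_entries s 'o' 1 k rfl hk
        (fun c r hr hcs => by
          rcases pvRankB_inv c r hr with ⟨h1, h2⟩ | ⟨h1, h2⟩ | ⟨h1, h2⟩ | ⟨h1, h2⟩ | ⟨h1, h2⟩ | ⟨h1, h2⟩ <;>
            first | omega | (subst h1; exact absurd hcs ha))
      rw [hscan, hfold, pvLoopA_skip s t 'a' _ ha, pvLoopA_hit s t 'o' _ k hk]; rfl
    · by_cases he : 'e' ∈ s
      · obtain ⟨k, hk⟩ := pvIndex?_of_mem s 'e' he
        have hfold := pvFoldMin_entries s 'e' 2 k rfl hk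
          (fun c r hr hcs => by
            rcases pvRankB_inv c r hr with ⟨h1, h2⟩ | ⟨h1, h2⟩ | ⟨h1, h2⟩ | ⟨h1, h2⟩ | ⟨h1, h2⟩ | ⟨h1, h2⟩ <;>
              first | omega | (subst h1; exact absurd hcs ha) | (subst h1; exact absurd hcs ho))
        rw [hscan, hfold, pvLoopA_skip s t 'a' _ ha, pvLoopA_skip s t 'o' _ ho,
          pvLoopA_hit s t 'e' _ k hk]; rfl
      · by_cases hi : 'i' ∈ s
        · obtain ⟨k, hk⟩ := pvIndex?_of_mem s 'i' hi
          have hfold := pvFoldMin_entries s 'i' 3 k rfl hk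
            (fun c r hr hcs => by
              rcases pvRankB_inv c r hr with ⟨h1, h2⟩ | ⟨h1, h2⟩ | ⟨h1, h2⟩ | ⟨h1, h2⟩ | ⟨h1, h2⟩ | ⟨h1, h2⟩ <;>
                first | omega | (subst h1; exact absurd hcs ha) | (subst h1; exact absurd hcs ho) |
                  (subst h1; exact absurd hcs he))
          rw [hscan, hfold, pvLoopA_skip s t 'a' _ ha, pvLoopA_skip s t 'o' _ ho,
            pvLoopA_skip s t 'e' _ he, pvLoopA_hit s t 'i' _ k hk]; rfl
        · by_cases hu : 'u' ∈ s
          · obtain ⟨k, hk⟩ := pvIndex?_of_mem s 'u' hu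
            have hfold := pvFoldMin_entries s 'u' 4 k rfl hk
              (fun c r hr hcs => by
                rcases pvRankB_inv c r hr with ⟨h1, h2⟩ | ⟨h1, h2⟩ | ⟨h1, h2⟩ | ⟨h1, h2⟩ | ⟨h1, h2⟩ | ⟨h1, h2⟩ <;>
                  first | omega | (subst h1; exact absurd hcs ha) | (subst h1; exact absurd hcs ho) |
                    (subst h1; exact absurd hcs he) | (subst h1; exact absurd hcs hi))
            rw [hscan, hfold, pvLoopA_skip s t 'a' _ ha, pvLoopA_skip s t 'o' _ ho,
              pvLoopA_skip s t 'e' _ he, pvLoopA_skip s t 'i' _ hi, pvLoopA_hit s t 'u' _ k hk]; rfl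
          · by_cases hv : 'ü' ∈ s
            · obtain ⟨k, hk⟩ := pvIndex?_of_mem s 'ü' hv
              have hfold := pvFoldMin_entries s 'ü' 5 k rfl hk
                (fun c r hr hcs => by
                  rcases pvRankB_inv c r hr with ⟨h1, h2⟩ | ⟨h1, h2⟩ | ⟨h1, h2⟩ | ⟨h1, h2⟩ | ⟨h1, h2⟩ | ⟨h1, h2⟩ <;>
                    first | omega | (subst h1; exact absurd hcs ha) | (subst h1; exact absurd hcs ho) |
                      (subst h1; exact absurd hcs he) | (subst h1; exact absurd hcs hi) |
                      (subst h1; exact absurd hcs hu))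
              rw [hscan, hfold, pvLoopA_skip s t 'a' _ ha, pvLoopA_skip s t 'o' _ ho,
                pvLoopA_skip s t 'e' _ he, pvLoopA_skip s t 'i' _ hi, pvLoopA_skip s t 'u' _ hu,
                pvLoopA_hit s t 'ü' _ k hk]; rfl
            · -- no vowel at all
              have hallno : ∀ w ∈ pvVowelsA, w ∉ s := by
                intro w hw
                fin_cases hw <;> assumption
              rw [hscan, pvEntries_nil_of_no_vowel s hallno 0]
              rw [pvLoopA_skip s t 'a' _ ha, pvLoopA_skip s t 'o' _ ho, pvLoopA_skip s t 'e' _ he,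
                pvLoopA_skip s t 'i' _ hi, pvLoopA_skip s t 'u' _ hu, pvLoopA_skip s t 'ü' _ hv]
              rfl

-- ===== VERDICT (by name: the statement is the Claim_ definition above) =====
set_option maxRecDepth 8192 in
set_option maxHeartbeats 2000000 in
theorem add_accents_spec : Claim_equal_add_accents := by
  unfold Claim_equal_add_accents
  intro syl _ _
  unfold Spec_add_accents
  show add_accents syl = add_accents_alt syl
  rcases hget : PySem.List.pyGet? ((PySem.Str.lower syl).toList) (-1) with _ | tc
  · simp only [add_accents, add_accents_alt, hget]
  · simp only [add_accents, add_accents_alt, hget]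
    set tone : Int := if PySem.Chars.isdigit tc then ((tc.toNat : Int) - 48) else 5 with htone
    set s1 : List Char := PySem.List.slice ((PySem.Str.lower syl).toList) none (some (-1))
      ++ [' '] ++ PySem.Int.toChars tone with hs1
    by_cases h5 : tone = 5
    · rw [if_neg (not_not_intro h5), if_pos h5]
    · rw [if_pos h5, if_neg h5]
      rcases hpf : pvPairFind s1 with _ | k
      · -- no "iu": find < 0 on A's side, scan = entry fold on B's side
        have hpos : PySem.Chars.find s1 ['i','u'] = -1 := by rw [pvFind_pair, hpf]; rfl
        rw [if_neg (by rw [hpos]; norm_num)]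
        exact pvMain s1 (tone - 1) hpf
      · -- "iu" at k: A splices at k+1, B's scan breaks with index k+1
        have hpos : PySem.Chars.find s1 ['i','u'] = (k : Int) := by rw [pvFind_pair, hpf]; rfl
        have hcons : pvPairFind ('\x00' :: s1) = some (k + 1) := by
          rw [pvPairFind_cons_ne '\x00' (by decide) s1, hpf]; rfl
        have hscan := pvScan_iu s1 0 '\x00' none (k + 1) hcons
        rw [show ((0 : Int) + ((k + 1 : Nat) : Int)) = (k : Int) + 1 by push_cast; ring] at hscan
        rw [if_pos (by rw [hpos]; positivity), hscan, hpos]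
        show _ = String.ofList (PySem.List.slice s1 none (some ((k : Int) + 1))
          ++ (PySem.List.pyGet? (pvMarksB 'u') (tone - 1)).toList
          ++ PySem.List.slice s1 (some ((k : Int) + 1 + 1)) none)
        rw [show (k : Int) + 1 + 1 = (k : Int) + 2 by ring]
        rfl
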